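-- pv_equiv track=rewrite | github.com/daxpatel9541/data-analysis-modal | mapper.py | auto_detect_columns
-- ===== SOURCE A (Python) =====
-- def auto_detect_columns(columns):
--     def find_col(keywords):
--         for c in columns:
--             low = c.lower()
--             for k in keywords:
--                 if k in low:
--                     return c
--         return None
--
--     date_col = find_col(["date", "order_date", "invoice_date", "time"])
--     product_col = find_col(["product", "item", "name", "sku"])
--     quantity_col = find_col(["qty", "quantity", "units", "count"])
--     price_col = find_col(["price", "unit_price", "cost"])
--     sales_col = find_col(["total_sales", "sales", "amount", "revenue", "total"])
--
--     return {
--         "date": date_col,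
--         "product": product_col,
--         "quantity": quantity_col,
--         "price": price_col,
--         "sales": sales_col
--     }
-- ===== SOURCE B (Python) =====
-- ROLE_KEYWORDS = {
--     "date": ["date", "order_date", "invoice_date", "time"],
--     "product": ["product", "item", "name", "sku"],
--     "quantity": ["qty", "quantity", "units", "count"],
--     "price": ["price", "unit_price", "cost"],
--     "sales": ["total_sales", "sales", "amount", "revenue", "total"],
-- }
--
-- def auto_detect_columns(columns):
--     roles = {role: None for role in ROLE_KEYWORDS}
--     for c in columns:
--         low = c.lower()
--         for role, kws in ROLE_KEYWORDS.items():
--             if roles[role] is None and any(k in low for k in kws):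
--                 roles[role] = c
--     return roles
-- ===== Notes on version B (the rewrite author's own statement) =====
-- stated objective: alternative
-- what changed: Replaced five separate first-match scans of the column list (one per role) by a single pass over columns that fills a role->column dict driven by a keyword table, keeping first-column-wins per role.
import Mathlib
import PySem

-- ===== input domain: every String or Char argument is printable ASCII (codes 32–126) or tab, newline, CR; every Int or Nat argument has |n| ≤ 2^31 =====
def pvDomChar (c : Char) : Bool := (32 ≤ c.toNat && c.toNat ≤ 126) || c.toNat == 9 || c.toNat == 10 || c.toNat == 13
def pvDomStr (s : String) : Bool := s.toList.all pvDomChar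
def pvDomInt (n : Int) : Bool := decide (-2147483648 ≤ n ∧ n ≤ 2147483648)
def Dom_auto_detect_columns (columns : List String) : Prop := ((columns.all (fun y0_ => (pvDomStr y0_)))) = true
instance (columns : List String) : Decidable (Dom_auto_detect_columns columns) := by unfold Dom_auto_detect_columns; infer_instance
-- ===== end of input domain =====

-- B replaces A's five separate scans of the column list by one pass filling a role table (alternative decomposition, same result).

-- ===== PORT A =====
-- find_col: first column whose lowercase contains one of the keywords
def pvFindCol (columns : List String) (keywords : List String) : Option String :=
  match columns with
  | [] => none
  | c :: rest =>
      let low := PySem.Str.lower c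
      if keywords.any (fun k => PySem.Str.isIn k low) then some c
      else pvFindCol rest keywords

def auto_detect_columns (columns : List String) : List (String × Option String) :=
  let date_col := pvFindCol columns ["date", "order_date", "invoice_date", "time"]
  let product_col := pvFindCol columns ["product", "item", "name", "sku"]
  let quantity_col := pvFindCol columns ["qty", "quantity", "units", "count"]
  let price_col := pvFindCol columns ["price", "unit_price", "cost"]
  let sales_col := pvFindCol columns ["total_sales", "sales", "amount", "revenue", "total"]
  [("date", date_col), ("product", product_col), ("quantity", quantity_col),
   ("price", price_col), ("sales", sales_col)]

-- ===== PORT B =====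
def pvRoleKeywords : List (String × List String) :=
  [("date", ["date", "order_date", "invoice_date", "time"]),
   ("product", ["product", "item", "name", "sku"]),
   ("quantity", ["qty", "quantity", "units", "count"]),
   ("price", ["price", "unit_price", "cost"]),
   ("sales", ["total_sales", "sales", "amount", "revenue", "total"])]

-- one pass over columns; for each still-empty role, fill it if a keyword matches
def auto_detect_columns_alt (columns : List String) : List (String × Option String) :=
  columns.foldl
    (fun roles c =>
      let low := PySem.Str.lower c
      roles.map (fun p =>
        match pvRoleKeywords.find? (fun rk => rk.1 == p.1) with
        | some rk =>
            if p.2.isNone && rk.2.any (fun k => PySem.Str.isIn k low) then (p.1, some c) else p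
        | none => p))
    (pvRoleKeywords.map (fun rk => (rk.1, (none : Option String))))

-- ===== PRECONDITION & SPEC =====
def Spec_auto_detect_columns (columns : List String) (out : List (String × Option String)) : Prop := out = auto_detect_columns_alt columns
instance (columns : List String) (out : List (String × Option String)) : Decidable (Spec_auto_detect_columns columns out) := by unfold Spec_auto_detect_columns; infer_instance

-- ===== CLAIM (what is proved, stated in full; the proofs are below) =====
def Claim_equal_auto_detect_columns : Prop := ∀ (columns : List String), Dom_auto_detect_columns columns → Spec_auto_detect_columns columns (auto_detect_columns columns)

-- ===== LEMMAS AND PROOFS =====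

-- one component of B's fold, for a fixed keyword list
def pvStep (kws : List String) (cur : Option String) (c : String) : Option String :=
  if cur.isNone && kws.any (fun k => PySem.Str.isIn k (PySem.Str.lower c)) then some c else cur

lemma foldl_pvStep_some (kws rest : List String) (x : String) :
    rest.foldl (pvStep kws) (some x) = some x := by
  induction rest with
  | nil => rfl
  | cons d rest ih => simpa [pvStep] using ih

lemma foldl_pvStep_none (columns kws : List String) :
    columns.foldl (pvStep kws) none = pvFindCol columns kws := by
  induction columns with
  | nil => rfl
  | cons c rest ih =>
      simp only [List.foldl_cons, pvFindCol]
      by_cases h : kws.any (fun k => PySem.Str.isIn k (PySem.Str.lower c)) = true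
      · rw [show pvStep kws none c = some c from by simp only [pvStep]; simp_all, if_pos h]
        exact foldl_pvStep_some _ _ _
      · rw [show pvStep kws none c = none from by simp only [pvStep]; simp_all, if_neg h]
        exact ih

-- B's whole fold state equals the 5-tuple of componentwise folds
lemma alt_fold_eq (columns : List String)
    (a b c d e : Option String) :
    columns.foldl
      (fun roles col =>
        let low := PySem.Str.lower col
        roles.map (fun p =>
          match pvRoleKeywords.find? (fun rk => rk.1 == p.1) with
          | some rk =>
              if p.2.isNone && rk.2.any (fun k => PySem.Str.isIn k low) then (p.1, some col) else p
          | none => p))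
      [("date", a), ("product", b), ("quantity", c), ("price", d), ("sales", e)]
    = [("date", columns.foldl (pvStep ["date", "order_date", "invoice_date", "time"]) a),
       ("product", columns.foldl (pvStep ["product", "item", "name", "sku"]) b),
       ("quantity", columns.foldl (pvStep ["qty", "quantity", "units", "count"]) c),
       ("price", columns.foldl (pvStep ["price", "unit_price", "cost"]) d),
       ("sales", columns.foldl (pvStep ["total_sales", "sales", "amount", "revenue", "total"]) e)] := by
  induction columns generalizing a b c d e with
  | nil => rfl
  | cons col rest ih =>
      simp only [List.foldl_cons]
      rw [show
        (List.map (fun p =>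
          match pvRoleKeywords.find? (fun rk => rk.1 == p.1) with
          | some rk =>
              if p.2.isNone && rk.2.any (fun k => PySem.Str.isIn k (PySem.Str.lower col)) then (p.1, some col) else p
          | none => p)
          [("date", a), ("product", b), ("quantity", c), ("price", d), ("sales", e)])
        = [("date", pvStep ["date", "order_date", "invoice_date", "time"] a col),
           ("product", pvStep ["product", "item", "name", "sku"] b col),
           ("quantity", pvStep ["qty", "quantity", "units", "count"] c col),
           ("price", pvStep ["price", "unit_price", "cost"] d col),
           ("sales", pvStep ["total_sales", "sales", "amount", "revenue", "total"] e col)]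
        from by
          simp only [List.map_cons, List.map_nil, pvRoleKeywords, pvStep, List.find?]
          norm_num
          refine ⟨?_, ?_, ?_, ?_, ?_⟩ <;> split_ifs <;> simp_all]
      exact ih _ _ _ _ _

-- ===== VERDICT (by name: the statement is the Claim_ definition above) =====
theorem auto_detect_columns_spec : Claim_equal_auto_detect_columns := by
  intro columns _
  unfold Spec_auto_detect_columns auto_detect_columns auto_detect_columns_alt
  rw [show pvRoleKeywords.map (fun rk => (rk.1, (none : Option String)))
      = [("date", none), ("product", none), ("quantity", none), ("price", none), ("sales", none)] from rfl]
  rw [alt_fold_eq]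
  simp only [foldl_pvStep_none]
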